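-- pv_equiv track=rewrite | github.com/DretcanuMihai/FundamenteleProgramariii | project_with_classes/Infrastructura/Functii_Ajutatoare/functii_siruri_de_caractere.py | nume_corect
-- ===== SOURCE A (Python) =====
-- def nume_corect(sir):
--     """
--     functie ce verifica daca un sir reprezinta un nume corect (sir nevid, primul caracter este o litera mare, iar
--     restul caracterelor sunt litere mici)
--     :param sir: sirul de caractere ce il verificam
--     :return: True - daca este un nume valid; False in caz contrar
--     """
--     if(sir==""):
--         return False
--     if(sir[0]<"A" or sir[0]>"Z"):
--         return False
--     for i in range (1,len(sir)):
--         if(sir[i]<"a" or sir[i]>"z"):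
--             return False
--     return True
-- ===== SOURCE B (Python) =====
-- import re
--
-- _NAME_RE = re.compile(r'[A-Z][a-z]*')
--
-- def nume_corect(sir):
--     return _NAME_RE.fullmatch(sir) is not None
-- ===== Notes on version B (the rewrite author's own statement) =====
-- stated objective: idiomatic
-- what changed: Replaces the explicit empty-check, first-character range test and index loop with a single precompiled regex fullmatch of [A-Z][a-z]*, letting the regex engine do the whole validation.
import Mathlib
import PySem

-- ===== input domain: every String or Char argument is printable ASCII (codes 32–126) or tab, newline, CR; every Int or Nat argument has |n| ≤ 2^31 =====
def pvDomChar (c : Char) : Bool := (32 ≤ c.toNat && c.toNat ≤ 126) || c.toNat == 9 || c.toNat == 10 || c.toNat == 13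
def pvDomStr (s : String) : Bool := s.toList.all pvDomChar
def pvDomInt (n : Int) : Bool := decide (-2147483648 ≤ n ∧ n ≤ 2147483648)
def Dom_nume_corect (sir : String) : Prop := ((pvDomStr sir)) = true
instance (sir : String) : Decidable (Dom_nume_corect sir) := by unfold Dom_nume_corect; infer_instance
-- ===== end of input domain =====

-- B replaces A's explicit empty-check, first-character test and index loop with a single
-- regex fullmatch of [A-Z][a-z]* (idiomatic); equal return value on every input.

-- ===== PORT A =====
-- the 'for i in range(1, len(sir))' loop with its early 'return False'
def numeLoopA (cs : List Char) : List Int → Bool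
  | [] => true
  | i :: rest =>
    match PySem.List.pyGet? cs i with
    | none => false  -- unreachable: indices come from range(1, len(sir))
    | some c => if c < 'a' || 'z' < c then false else numeLoopA cs rest

def nume_corect (sir : String) : Bool :=
  let cs := sir.toList
  if cs = [] then false
  else
    match PySem.List.pyGet? cs 0 with
    | none => false  -- unreachable: cs nonempty
    | some c =>
      if c < 'A' || 'Z' < c then false
      else numeLoopA cs (PySem.List.pyRange 1 (cs.length : Int) 1)

-- ===== PORT B =====
-- hand-ported regex engine for fullmatch([A-Z][a-z]*): consume one uppercase letter,
-- then the Kleene star [a-z]* must consume the entire remainder (exact for this pattern)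
def nume_corect_alt (sir : String) : Bool :=
  match sir.toList with
  | [] => false
  | c :: rest => ('A' ≤ c && c ≤ 'Z') && rest.all (fun d => 'a' ≤ d && d ≤ 'z')

-- ===== PRECONDITION & SPEC =====
def Spec_nume_corect (sir : String) (out : Bool) : Prop := out = nume_corect_alt sir
instance (sir : String) (out : Bool) : Decidable (Spec_nume_corect sir out) := by unfold Spec_nume_corect; infer_instance

-- ===== CLAIM (what is proved, stated in full; the proofs are below) =====
def Claim_equal_nume_corect : Prop := ∀ (sir : String), Dom_nume_corect sir → Spec_nume_corect sir (nume_corect sir)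

-- ===== LEMMAS AND PROOFS =====
lemma numeLoopA_eq (pre rest : List Char) :
    numeLoopA (pre ++ rest) (PySem.List.pyRange (pre.length : Int) ((pre ++ rest).length : Int) 1)
      = rest.all (fun d => 'a' ≤ d && d ≤ 'z') := by
  induction rest generalizing pre with
  | nil => simp [PySem.List.pyRange_one_eq_nil, numeLoopA]
  | cons d rest ih =>
    have hlt : (pre.length : Int) < ((pre ++ d :: rest).length : Int) := by
      simp
    rw [PySem.List.pyRange_one_cons hlt]
    have hget : PySem.List.pyGet? (pre ++ d :: rest) (pre.length : Int) = some d := by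
      rw [PySem.List.pyGet?_natCast]
      simp
    simp only [numeLoopA, hget]
    by_cases h : d < 'a' || 'z' < d
    · have hd : (decide ('a' ≤ d) && decide (d ≤ 'z')) = false := by
        rcases Bool.or_eq_true_iff.mp h with h' | h'
        · have hn : ¬ ('a' ≤ d) := not_le.mpr (by simpa using h')
          simp [hn]
        · have hn : ¬ (d ≤ 'z') := not_le.mpr (by simpa using h')
          simp [hn]
      rw [if_pos h]
      simp [List.all_cons, hd]
    · obtain ⟨h1, h2⟩ : 'a' ≤ d ∧ d ≤ 'z' := by simpa using h
      rw [if_neg h]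
      rw [show (pre.length : Int) + 1 = (((pre ++ [d]).length : Nat) : Int) from by simp]
      rw [show pre ++ d :: rest = (pre ++ [d]) ++ rest from by simp]
      rw [ih (pre ++ [d])]
      simp [List.all_cons, h1, h2]

-- ===== VERDICT (by name: the statement is the Claim_ definition above) =====
theorem nume_corect_spec : Claim_equal_nume_corect := by
  intro sir _
  unfold Spec_nume_corect nume_corect nume_corect_alt
  cases hcs : sir.toList with
  | nil => simp
  | cons c rest =>
    have hne : (c :: rest) ≠ ([] : List Char) := by simp
    rw [if_neg hne]
    have hget0 : PySem.List.pyGet? (c :: rest) (0 : Int) = some c := by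
      rw [show (0 : Int) = ((0 : Nat) : Int) by rfl, PySem.List.pyGet?_natCast]; rfl
    simp only [hget0]
    by_cases h : c < 'A' || 'Z' < c
    · have hc : (decide ('A' ≤ c) && decide (c ≤ 'Z')) = false := by
        rcases Bool.or_eq_true_iff.mp h with h' | h'
        · have hn : ¬ ('A' ≤ c) := not_le.mpr (by simpa using h')
          simp [hn]
        · have hn : ¬ (c ≤ 'Z') := not_le.mpr (by simpa using h')
          simp [hn]
      rw [if_pos h]
      simp [hc]
    · obtain ⟨h1, h2⟩ : 'A' ≤ c ∧ c ≤ 'Z' := by simpa using h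
      rw [if_neg h]
      have hA := numeLoopA_eq [c] rest
      simp only [List.singleton_append, List.length_cons] at hA ⊢
      push_cast at hA ⊢
      norm_num at hA
      rw [hA]
      simp [h1, h2]
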